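-- pv_equiv track=rewrite | github.com/coseeing/WordBridge | addon/globalPlugins/WordBridge/lib/tasks/typo/utils.py | get_segments_to_recorrect
-- ===== SOURCE A (Python) =====
-- def get_segments_to_recorrect(segments: list, typo_indices: list, max_length: int = 30) -> tuple:
-- 	text = "".join(segments)
-- 	segments_to_correct = []
-- 	index_start = 0
-- 	index_end = 0
-- 	for segment in segments:
-- 		is_error = False
-- 		index_end += len(segment)
-- 		text_with_tag = ""
-- 		for j in range(index_start, index_end):
-- 			if j in typo_indices:
-- 				is_error = True
-- 				text_with_tag += ("[[" + text[j] + "]]")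
-- 			else:
-- 				text_with_tag += text[j]
-- 		if is_error:
-- 			segments_to_correct.append(text_with_tag)
-- 		else:
-- 			segments_to_correct.append("")
-- 		index_start = index_end
--
-- 	return segments_to_correct
-- ===== SOURCE B (Python) =====
-- def _locate(offsets, t):
-- 	# largest i with offsets[i] <= t (offsets nondecreasing, offsets[0] = 0 <= t)
-- 	lo = 0
-- 	hi = len(offsets) - 1
-- 	while lo < hi:
-- 		mid = (lo + hi + 1) // 2
-- 		if offsets[mid] <= t:
-- 			lo = mid
-- 		else:
-- 			hi = mid - 1
-- 	return lo
--
--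
-- def get_segments_to_recorrect(segments: list, typo_indices: list, max_length: int = 30) -> tuple:
-- 	offsets = [0]
-- 	for segment in segments:
-- 		offsets.append(offsets[-1] + len(segment))
-- 	total = offsets[-1]
-- 	buckets = [set() for _ in segments]
-- 	for t in typo_indices:
-- 		if 0 <= t < total:
-- 			i = _locate(offsets, t)
-- 			buckets[i].add(t - offsets[i])
-- 	result = []
-- 	for i, segment in enumerate(segments):
-- 		if buckets[i]:
-- 			result.append("".join(
-- 				"[[" + c + "]]" if k in buckets[i] else c
-- 				for k, c in enumerate(segment)))
-- 		else:
-- 			result.append("")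
-- 	return result
-- ===== Notes on version B (the rewrite author's own statement) =====
-- stated objective: faster
-- what changed: A walks every character of the concatenated text and tests 'j in typo_indices' (a linear list scan) per character; B never walks the text for detection: it builds prefix-sum offsets, assigns each typo index to its segment by hand-written binary search over the offsets (bucketing local positions per segment), and then tags only within each segment against its own bucket.
import Mathlib
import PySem

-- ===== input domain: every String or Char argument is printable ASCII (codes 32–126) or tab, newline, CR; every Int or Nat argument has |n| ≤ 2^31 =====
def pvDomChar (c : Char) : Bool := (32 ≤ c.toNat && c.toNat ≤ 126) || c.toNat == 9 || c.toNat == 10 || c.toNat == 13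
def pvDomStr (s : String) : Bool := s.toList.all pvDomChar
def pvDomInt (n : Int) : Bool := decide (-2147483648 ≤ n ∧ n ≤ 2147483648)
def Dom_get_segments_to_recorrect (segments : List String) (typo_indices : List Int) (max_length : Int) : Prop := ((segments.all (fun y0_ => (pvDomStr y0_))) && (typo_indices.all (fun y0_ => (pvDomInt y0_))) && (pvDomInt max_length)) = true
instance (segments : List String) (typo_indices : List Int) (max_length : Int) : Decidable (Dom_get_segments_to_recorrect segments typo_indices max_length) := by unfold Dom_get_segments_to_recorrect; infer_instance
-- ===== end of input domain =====

-- B replaces A's per-character scan of the concatenated text (with a linear `j in typo_indices`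
-- test per character) by an index-driven algorithm: prefix-sum offsets, binary search to bucket
-- each typo index into its segment, then local tagging of only the affected segments; objective: faster.

-- ===== PORT A =====
def get_segments_to_recorrect (segments : List String) (typo_indices : List Int) (max_length : Int) : List String :=
  let text : List Char := (segments.map String.toList).flatten
  let st := segments.foldl (fun (st : List String × Int × Int) (segment : String) =>
    let index_end := st.2.2 + PySem.Str.len segment
    let p := (PySem.List.pyRange st.2.1 index_end 1).foldl
      (fun (p : Bool × List Char) (j : Int) =>
        if typo_indices.contains j then
          (true, p.2 ++ ['[', '['] ++ [PySem.List.pyGetD text j ' '] ++ [']', ']'])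
        else
          (p.1, p.2 ++ [PySem.List.pyGetD text j ' ']))
      (false, ([] : List Char))
    (st.1 ++ [if p.1 then String.ofList p.2 else ""], index_end, index_end))
    ([], 0, 0)
  st.1

-- ===== PORT B =====
-- B's hand-written binary search: largest i with offsets[i] <= t
-- (called only with offsets[lo] <= t, so the loop's invariants hold; faithful to the while-loop)
def gsr_locate (offsets : List Int) (t : Int) (lo hi : Int) : Int :=
  if _h : lo < hi then
    let mid := PySem.Int.floordiv (lo + hi + 1) 2
    if PySem.List.pyGetD offsets mid 0 ≤ t then gsr_locate offsets t mid hi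
    else gsr_locate offsets t lo (mid - 1)
  else lo
termination_by (hi - lo).toNat
decreasing_by
  · have hb := PySem.Int.floordiv_two_mid_bounds (lo := lo + 1) (hi := hi) (by omega)
    have : lo + 1 + hi = lo + hi + 1 := by ring
    rw [this] at hb
    omega
  · have hb := PySem.Int.floordiv_two_mid_bounds (lo := lo + 1) (hi := hi) (by omega)
    have : lo + 1 + hi = lo + hi + 1 := by ring
    rw [this] at hb
    omega

def get_segments_to_recorrect_alt (segments : List String) (typo_indices : List Int) (max_length : Int) : List String :=
  let offsets : List Int := segments.foldl
    (fun (off : List Int) segment => off ++ [PySem.List.pyGetD off (-1) 0 + PySem.Str.len segment]) [0]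
  let total := PySem.List.pyGetD offsets (-1) 0
  let buckets0 : List (PySem.Set Int) := segments.map (fun _ => PySem.Set.empty)
  let buckets := typo_indices.foldl (fun (bk : List (PySem.Set Int)) t =>
    if 0 ≤ t ∧ t < total then
      let i := gsr_locate offsets t 0 ((offsets.length : Int) - 1)
      -- buckets[i].add(t - offsets[i]): i is a valid nonnegative index here, so List.modify at i.toNat is exact
      bk.modify i.toNat (fun s => PySem.Set.add s (t - PySem.List.pyGetD offsets i 0))
    else bk) buckets0
  (PySem.List.enumerate segments).map (fun ise =>
    let b := PySem.List.pyGetD buckets ise.1 PySem.Set.empty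
    if b ≠ [] then
      String.ofList ((PySem.List.enumerate ise.2.toList).map (fun kc =>
        if PySem.Set.contains b kc.1 then ['[', '['] ++ [kc.2] ++ [']', ']'] else [kc.2])).flatten
    else "")

-- ===== PRECONDITION & SPEC =====
def Spec_get_segments_to_recorrect (segments : List String) (typo_indices : List Int) (max_length : Int) (out : List String) : Prop := out = get_segments_to_recorrect_alt segments typo_indices max_length
instance (segments : List String) (typo_indices : List Int) (max_length : Int) (out : List String) : Decidable (Spec_get_segments_to_recorrect segments typo_indices max_length out) := by unfold Spec_get_segments_to_recorrect; infer_instance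

-- ===== CLAIM (what is proved, stated in full; the proofs are below) =====
def Claim_equal_get_segments_to_recorrect : Prop := ∀ (segments : List String) (typo_indices : List Int) (max_length : Int), Dom_get_segments_to_recorrect segments typo_indices max_length → Spec_get_segments_to_recorrect segments typo_indices max_length (get_segments_to_recorrect segments typo_indices max_length)

-- ===== LEMMAS AND PROOFS =====

-- prefix-sum offset of segment i inside the concatenated text (Nat and Int forms)
def pvOffN (css : List (List Char)) (i : Nat) : Nat := ((css.take i).map List.length).sum

def pvOff (css : List (List Char)) (i : Nat) : Int := (pvOffN css i : Int)

-- per-index tag as A computes it (indexing into the full text)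
def pvTagA (typo : List Int) (text : List Char) (j : Int) : List Char :=
  if typo.contains j then ['[', '['] ++ [PySem.List.pyGetD text j ' '] ++ [']', ']']
  else [PySem.List.pyGetD text j ' ']

-- the result both programs compute for one segment, as a function of its global offset
def pvOut (typo : List Int) (text : List Char) (s : Int) (cs : List Char) : String :=
  if (PySem.List.pyRange s (s + cs.length) 1).any (fun j => typo.contains j) then
    String.ofList ((PySem.List.pyRange s (s + cs.length) 1).flatMap (pvTagA typo text))
  else ""

def pvSpecL (typo : List Int) (text : List Char) : Int → List (List Char) → List String
  | _, [] => []
  | s, cs :: rest => pvOut typo text s cs :: pvSpecL typo text (s + cs.length) rest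

-- A's loop body named
def pvAf (typo : List Int) (text : List Char) (st : List String × Int × Int) (segment : String) :
    List String × Int × Int :=
  let index_end := st.2.2 + PySem.Str.len segment
  let p := (PySem.List.pyRange st.2.1 index_end 1).foldl
    (fun (p : Bool × List Char) (j : Int) =>
      if typo.contains j then
        (true, p.2 ++ ['[', '['] ++ [PySem.List.pyGetD text j ' '] ++ [']', ']'])
      else
        (p.1, p.2 ++ [PySem.List.pyGetD text j ' ']))
    (false, ([] : List Char))
  (st.1 ++ [if p.1 then String.ofList p.2 else ""], index_end, index_end)

lemma portA_unfold (segments : List String) (typo : List Int) (mx : Int) :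
    get_segments_to_recorrect segments typo mx
      = (segments.foldl (pvAf typo ((segments.map String.toList).flatten)) ([], 0, 0)).1 := rfl

-- A's inner per-character loop in closed form: an any-flag and a flatMap of per-index tags
lemma innerA (typo : List Int) (text : List Char) :
    ∀ (r : List Int) (b : Bool) (cs : List Char),
    r.foldl (fun (p : Bool × List Char) (j : Int) =>
        if typo.contains j then
          (true, p.2 ++ ['[', '['] ++ [PySem.List.pyGetD text j ' '] ++ [']', ']'])
        else
          (p.1, p.2 ++ [PySem.List.pyGetD text j ' '])) (b, cs)
      = (b || r.any (fun j => typo.contains j), cs ++ r.flatMap (pvTagA typo text)) := by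
  intro r
  induction r with
  | nil => intro b cs; simp
  | cons x t ih =>
      intro b cs
      simp only [List.foldl_cons, List.any_cons, List.flatMap_cons, pvTagA]
      by_cases hx : typo.contains x = true
      · rw [if_pos hx, if_pos hx, ih]
        simp only [hx, Bool.true_or, Bool.or_true, List.append_assoc]
      · rw [if_neg hx, if_neg hx, ih]
        rw [Bool.not_eq_true] at hx
        simp only [hx, Bool.false_or, List.append_assoc]

-- A's segment loop is pvSpecL
lemma A_closed (typo : List Int) (text : List Char) :
    ∀ (segs : List String) (s : Int) (acc : List String),
    (segs.foldl (pvAf typo text) (acc, s, s)).1 = acc ++ pvSpecL typo text s (segs.map String.toList) := by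
  intro segs
  induction segs with
  | nil => intro s acc; simp [pvSpecL]
  | cons seg rest ih =>
      intro s acc
      simp only [List.foldl_cons, List.map_cons, pvSpecL]
      have hlen : PySem.Str.len seg = ((seg.toList.length : Nat) : Int) := by
        simp [PySem.Str.len_eq]
      simp only [pvAf, hlen, innerA, Bool.false_or, List.nil_append]
      rw [ih (s + (seg.toList.length : Int)) (acc ++ [_])]
      simp only [List.append_assoc, List.singleton_append]
      rfl

-- ===== pvOff facts =====
lemma pvOff_cons (cs : List Char) (rest : List (List Char)) (j : Nat) :
    pvOff (cs :: rest) (j + 1) = (cs.length : Int) + pvOff rest j := by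
  simp [pvOff, pvOffN]

lemma pvOffN_succ (css : List (List Char)) (i : Nat) (h : i < css.length) :
    pvOffN css (i + 1) = pvOffN css i + (css[i]'h).length := by
  simp only [pvOffN, List.take_add_one, List.getElem?_eq_getElem h, Option.toList_some,
    List.map_append, List.sum_append, List.map_cons, List.map_nil, List.sum_cons,
    List.sum_nil, Nat.add_zero]

lemma pvOff_succ (css : List (List Char)) (i : Nat) (h : i < css.length) :
    pvOff css (i + 1) = pvOff css i + ((css[i]'h).length : Int) := by
  simp only [pvOff, pvOffN_succ css i h]
  push_cast
  ring

lemma pvOffN_mono (css : List (List Char)) {i j : Nat} (h : i ≤ j) : pvOffN css i ≤ pvOffN css j := by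
  unfold pvOffN
  have e : css.take j = css.take i ++ ((css.take j).drop i) := by
    conv_lhs => rw [← List.take_append_drop i (css.take j), List.take_take, min_eq_left h]
  rw [e, List.map_append, List.sum_append]
  omega

lemma pvOff_mono (css : List (List Char)) {i j : Nat} (h : i ≤ j) : pvOff css i ≤ pvOff css j := by
  simp only [pvOff]
  exact_mod_cast pvOffN_mono css h

lemma pvOffN_total (css : List (List Char)) : pvOffN css css.length = css.flatten.length := by
  simp [pvOffN, List.length_flatten]

-- the text from offset i on is the flattening of the remaining segments
lemma flatten_drop_off (css : List (List Char)) :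
    ∀ (i : Nat), css.flatten.drop (pvOffN css i) = (css.drop i).flatten := by
  intro i
  induction css generalizing i with
  | nil => simp [pvOffN]
  | cons cs rest ih =>
      cases i with
      | zero => simp [pvOffN]
      | succ i' =>
          simp only [pvOffN, List.take_succ_cons, List.map_cons, List.sum_cons, List.flatten_cons,
            List.drop_succ_cons]
          rw [List.drop_length_add_append]
          exact ih i'

lemma text_get (css : List (List Char)) (i : Nat) (hi : i < css.length) (k : Nat)
    (hk : k < (css[i]'hi).length) :
    PySem.List.pyGetD css.flatten (pvOff css i + (k : Int)) ' ' = (css[i]'hi)[k] := by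
  have hlt : pvOffN css i + k < css.flatten.length := by
    have h1 : pvOffN css (i+1) ≤ pvOffN css css.length := pvOffN_mono css (by omega)
    have h2 := pvOffN_succ css i hi
    rw [pvOffN_total] at h1
    omega
  have hcast : pvOff css i + (k : Int) = ((pvOffN css i + k : Nat) : Int) := by
    simp only [pvOff]
    push_cast
    ring
  rw [hcast, PySem.List.pyGetD_natCast, List.getD_eq_getElem _ _ hlt]
  have hdk : k < (css.flatten.drop (pvOffN css i)).length := by
    rw [List.length_drop]; omega
  rw [← List.getElem_drop (h := hdk)]
  rw [List.getElem_of_eq (flatten_drop_off css i)]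
  have hdrop : css.drop i = (css[i]'hi) :: css.drop (i+1) := by
    rw [List.drop_eq_getElem_cons hi]
  rw [List.getElem_of_eq (congrArg List.flatten hdrop)]
  simp only [List.flatten_cons]
  exact List.getElem_append_left hk

-- ===== offsets list in closed form =====
def pvOffsAux : Int → List (List Char) → List Int
  | _, [] => []
  | s, cs :: rest => (s + cs.length) :: pvOffsAux (s + cs.length) rest

lemma fold_offsets : ∀ (segs : List String) (l : List Int) (s : Int),
    segs.foldl (fun (off : List Int) segment =>
        off ++ [PySem.List.pyGetD off (-1) 0 + PySem.Str.len segment]) (l ++ [s])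
      = (l ++ [s]) ++ pvOffsAux s (segs.map String.toList) := by
  intro segs
  induction segs with
  | nil => intro l s; simp [pvOffsAux]
  | cons seg rest ih =>
      intro l s
      simp only [List.foldl_cons, List.map_cons, pvOffsAux]
      have hg : PySem.List.pyGetD (l ++ [s]) (-1) 0 = s := by
        simp [PySem.List.pyGetD, PySem.List.pyGet?, PySem.List.pyIdx?]
      rw [hg]
      have hlen : PySem.Str.len seg = ((seg.toList.length : Nat) : Int) := by
        simp [PySem.Str.len_eq]
      rw [hlen]
      rw [ih (l ++ [s]) (s + (seg.toList.length : Int))]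
      simp [List.append_assoc]

lemma aux_closed : ∀ (suf pre : List (List Char)),
    pvOffsAux (pvOff (pre ++ suf) pre.length) suf
      = (List.range' (pre.length + 1) suf.length).map (pvOff (pre ++ suf)) := by
  intro suf
  induction suf with
  | nil => intro pre; simp [pvOffsAux]
  | cons cs rest ih =>
      intro pre
      simp only [pvOffsAux, List.length_cons, List.range'_succ, List.map_cons]
      have hget : (pre ++ cs :: rest)[pre.length]'(by simp) = cs := by
        simp [List.getElem_append_right]
      have h : pre.length < (pre ++ cs :: rest).length := by simp
      have hsucc : pvOff (pre ++ cs :: rest) (pre.length + 1)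
          = pvOff (pre ++ cs :: rest) pre.length + (cs.length : Int) := by
        simp only [pvOff, pvOffN, List.take_add_one, List.getElem?_eq_getElem h, hget,
          Option.toList_some, List.map_append, List.sum_append, List.map_cons, List.map_nil,
          List.sum_cons, List.sum_nil, Nat.add_zero]
        push_cast
        ring
      rw [← hsucc]
      have h2 := ih (pre ++ [cs])
      simp only [List.append_assoc, List.singleton_append, List.length_append, List.length_cons,
        List.length_nil, Nat.zero_add] at h2
      rw [h2]

lemma offsets_closed (segments : List String) :
    segments.foldl (fun (off : List Int) segment =>
        off ++ [PySem.List.pyGetD off (-1) 0 + PySem.Str.len segment]) [0]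
      = (List.range (segments.length + 1)).map (fun i => pvOff (segments.map String.toList) i) := by
  have h1 := fold_offsets segments [] 0
  simp only [List.nil_append] at h1
  rw [h1]
  have h2 := aux_closed (segments.map String.toList) []
  simp only [List.nil_append, List.length_nil, Nat.zero_add] at h2
  have hz : pvOff (segments.map String.toList) 0 = 0 := by simp [pvOff, pvOffN]
  rw [hz] at h2
  rw [h2]
  rw [List.range_eq_range', List.range'_succ, List.map_cons]
  simp [pvOff, pvOffN]

-- ===== binary-search correctness =====
lemma locate_spec (css : List (List Char)) (t : Int) :
    ∀ (lo hi : Int), 0 ≤ lo → lo ≤ hi → hi ≤ (css.length : Int) →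
    pvOff css lo.toNat ≤ t →
    (∀ j : Nat, hi < (j : Int) → j ≤ css.length → t < pvOff css j) →
    (let r := gsr_locate ((List.range (css.length + 1)).map (fun k => pvOff css k)) t lo hi
     lo ≤ r ∧ r ≤ hi ∧ pvOff css r.toNat ≤ t ∧
      (∀ j : Nat, r < (j : Int) → j ≤ css.length → t < pvOff css j)) := by
  intro lo hi
  induction hn : (hi - lo).toNat using Nat.strong_induction_on generalizing lo hi with
  | _ n ih =>
  intro hlo hlohi hhi hlow hup
  dsimp only
  rw [gsr_locate]
  by_cases hc : lo < hi
  · rw [dif_pos hc]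
    dsimp only
    have hb := PySem.Int.floordiv_two_mid_bounds (lo := lo + 1) (hi := hi) (by omega)
    rw [show lo + 1 + hi = lo + hi + 1 from by ring] at hb
    set mid := PySem.Int.floordiv (lo + hi + 1) 2 with hmid
    have hmid1 : lo + 1 ≤ mid := hb.1
    have hmid2 : mid ≤ hi := hb.2
    have hmidget : PySem.List.pyGetD ((List.range (css.length + 1)).map (fun k => pvOff css k)) mid 0
        = pvOff css mid.toNat := by
      rw [show mid = ((mid.toNat : Nat) : Int) from by omega, PySem.List.pyGetD_natCast]
      rw [List.getD_eq_getElem _ _ (by rw [List.length_map, List.length_range]; omega)]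
      rw [List.getElem_map, List.getElem_range, Int.toNat_natCast]
    rw [hmidget]
    by_cases hcond : pvOff css mid.toNat ≤ t
    · rw [if_pos hcond]
      have hrec := ih ((hi - mid).toNat) (by omega) mid hi rfl (by omega) (by omega) hhi hcond hup
      dsimp only at hrec
      exact ⟨by omega, hrec.2.1, hrec.2.2.1, hrec.2.2.2⟩
    · rw [if_neg hcond]
      have hup' : ∀ j : Nat, mid - 1 < (j : Int) → j ≤ css.length → t < pvOff css j := by
        intro j hj1 hj2
        by_cases hjh : hi < (j : Int)
        · exact hup j hjh hj2
        · have hmj : mid.toNat ≤ j := by omega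
          have := pvOff_mono css hmj
          omega
      have hrec := ih ((mid - 1 - lo).toNat) (by omega) lo (mid - 1) rfl hlo (by omega)
        (by omega) hlow hup'
      dsimp only at hrec
      exact ⟨hrec.1, by omega, hrec.2.2.1, hrec.2.2.2⟩
  · rw [dif_neg hc]
    have : lo = hi := by omega
    exact ⟨le_refl lo, by omega, hlow, by rw [this]; exact hup⟩

-- ===== bucket characterization =====
def pvBucketF (css : List (List Char)) (bk : List (PySem.Set Int)) (t : Int) :
    List (PySem.Set Int) :=
  if 0 ≤ t ∧ t < pvOff css css.length then
    let i := gsr_locate ((List.range (css.length + 1)).map (fun k => pvOff css k)) t 0 (css.length : Int)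
    bk.modify i.toNat (fun s => PySem.Set.add s (t - pvOff css i.toNat))
  else bk

lemma buckets_mem (css : List (List Char)) (ts : List Int) :
    ∀ (bk : List (PySem.Set Int)), bk.length = css.length →
    ∀ (i : Nat) (hilt : i < css.length) (m : Int),
    (m ∈ (ts.foldl (pvBucketF css) bk).getD i [] ↔
      (m ∈ bk.getD i [] ∨ (0 ≤ m ∧ m < ((css[i]'hilt).length : Int) ∧ (pvOff css i + m) ∈ ts))) := by
  induction ts with
  | nil =>
      intro bk hlen i hilt m
      simp
  | cons t ts ih =>
      intro bk hlen i hilt m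
      rw [List.foldl_cons]
      have hnn : (0 : Int) ≤ pvOff css i := Int.natCast_nonneg _
      have hsucc := pvOff_succ css i hilt
      have htot : pvOff css (i + 1) ≤ pvOff css css.length := pvOff_mono css (by omega)
      by_cases hg : 0 ≤ t ∧ t < pvOff css css.length
      · -- t lands in some bucket r
        have hspec := locate_spec css t 0 (css.length : Int) (le_refl 0) (by omega) (le_refl _)
          (by
            have h0 : pvOff css (0 : Int).toNat = 0 := by simp [pvOff, pvOffN]
            omega)
          (by intro j hj1 hj2; omega)
        dsimp only at hspec
        obtain ⟨hr1, hr2, hr3, hr4⟩ := hspec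
        set r := gsr_locate ((List.range (css.length + 1)).map (fun k => pvOff css k)) t 0
          (css.length : Int) with hr
        have hrlen : r.toNat ≤ css.length := by omega
        have hrlt : r.toNat < css.length := by
          rcases Nat.lt_or_ge r.toNat css.length with h | h
          · exact h
          · exfalso
            have : r.toNat = css.length := by omega
            rw [this] at hr3
            omega
        have hup1 : t < pvOff css (r.toNat + 1) := hr4 (r.toNat + 1) (by omega) (by omega)
        have hbk' : pvBucketF css bk t
            = bk.modify r.toNat (fun s => PySem.Set.add s (t - pvOff css r.toNat)) := by
          unfold pvBucketF
          rw [if_pos hg]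
        rw [hbk', ih _ (by rw [List.length_modify]; exact hlen) i hilt m]
        have hgetd : (bk.modify r.toNat (fun s => PySem.Set.add s (t - pvOff css r.toNat))).getD i []
            = if r.toNat = i then PySem.Set.add (bk.getD i []) (t - pvOff css r.toNat)
              else bk.getD i [] := by
          rw [List.getD_eq_getElem _ _ (by rw [List.length_modify]; omega),
            List.getElem_modify, List.getD_eq_getElem _ _ (by omega)]
        rw [hgetd]
        by_cases hi : r.toNat = i
        · subst hi
          rw [if_pos rfl]
          have hmem := PySem.Set.mem_add (s := bk.getD r.toNat []) (x := t - pvOff css r.toNat) (y := m)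
          rw [hmem]
          simp only [List.mem_cons]
          constructor
          · rintro (⟨h | h⟩ | ⟨h1, h2, h3⟩)
            · exact Or.inl h
            · exact Or.inr ⟨by omega, by omega, Or.inl (by omega)⟩
            · exact Or.inr ⟨h1, h2, Or.inr h3⟩
          · rintro (h | ⟨h1, h2, h | h⟩)
            · exact Or.inl (Or.inl h)
            · exact Or.inl (Or.inr (by omega))
            · exact Or.inr ⟨h1, h2, h⟩
        · rw [if_neg hi]
          have hne : ∀ (h1 : 0 ≤ m), m < ((css[i]'hilt).length : Int) → pvOff css i + m ≠ t := by
            intro h1 h2 he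
            rcases Nat.lt_or_ge i r.toNat with hlt | hge
            · have : pvOff css (i + 1) ≤ pvOff css r.toNat := pvOff_mono css (by omega)
              omega
            · have hgt : r.toNat < i := by omega
              have : pvOff css (r.toNat + 1) ≤ pvOff css i := pvOff_mono css (by omega)
              omega
          simp only [List.mem_cons]
          constructor
          · rintro (h | ⟨h1, h2, h3⟩)
            · exact Or.inl h
            · exact Or.inr ⟨h1, h2, Or.inr h3⟩
          · rintro (h | ⟨h1, h2, h | h⟩)
            · exact Or.inl h
            · exact absurd h (hne h1 h2)
            · exact Or.inr ⟨h1, h2, h⟩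
      · -- t is filtered out: it cannot equal any in-range global index
        have hbk' : pvBucketF css bk t = bk := by
          unfold pvBucketF
          rw [if_neg hg]
        rw [hbk', ih bk hlen i hilt m]
        have hne : ∀ (h1 : 0 ≤ m), m < ((css[i]'hilt).length : Int) → pvOff css i + m ≠ t := by
          intro h1 h2 he
          exact hg ⟨by omega, by omega⟩
        simp only [List.mem_cons]
        constructor
        · rintro (h | ⟨h1, h2, h3⟩)
          · exact Or.inl h
          · exact Or.inr ⟨h1, h2, Or.inr h3⟩
        · rintro (h | ⟨h1, h2, h | h⟩)
          · exact Or.inl h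
          · exact absurd h (hne h1 h2)
          · exact Or.inr ⟨h1, h2, h⟩

-- pvSpecL element-wise
lemma pvSpecL_length (typo : List Int) (text : List Char) :
    ∀ (css : List (List Char)) (s : Int), (pvSpecL typo text s css).length = css.length := by
  intro css
  induction css with
  | nil => intro s; rfl
  | cons cs rest ih => intro s; simp [pvSpecL, ih]

lemma pvSpecL_get (typo : List Int) (text : List Char) :
    ∀ (css : List (List Char)) (s : Int) (i : Nat) (h : i < css.length),
    (pvSpecL typo text s css)[i]'(by rw [pvSpecL_length]; exact h)
      = pvOut typo text (s + pvOff css i) (css[i]) := by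
  intro css
  induction css with
  | nil => intro s i h; simp at h
  | cons cs rest ih =>
      intro s i h
      cases i with
      | zero => simp [pvSpecL, pvOff, pvOffN]
      | succ i' =>
          simp only [pvSpecL, List.getElem_cons_succ]
          rw [ih (s + cs.length) i' (by simpa using h)]
          congr 1
          rw [pvOff_cons]
          ring

-- local tagging from a bucket equals A's global tagging over the matching index range
lemma contentC (typo : List Int) (text : List Char) (b : PySem.Set Int) :
    ∀ (cs : List Char) (k0 s : Int),
    (∀ k : Nat, k < cs.length → (PySem.Set.contains b (k0 + (k : Int)) = typo.contains (s + (k : Int)))) →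
    (∀ (k : Nat) (hk : k < cs.length), PySem.List.pyGetD text (s + (k : Int)) ' ' = cs[k]) →
    ((PySem.List.enumerate cs k0).map (fun kc =>
        if PySem.Set.contains b kc.1 then ['[', '['] ++ [kc.2] ++ [']', ']'] else [kc.2])).flatten
      = (PySem.List.pyRange s (s + (cs.length : Int)) 1).flatMap (pvTagA typo text) := by
  intro cs
  induction cs with
  | nil =>
      intro k0 s _ _
      simp [PySem.List.enumerate, PySem.List.pyRange_one_eq_nil]
  | cons c t ih =>
      intro k0 s hmem hget
      rw [PySem.List.enumerate_cons, List.map_cons, List.flatten_cons]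
      rw [PySem.List.pyRange_one_cons (by push_cast [List.length_cons]; omega), List.flatMap_cons]
      have h0 : PySem.List.pyGetD text s ' ' = c := by
        have := hget 0 (by simp)
        simpa using this
      have hm0 : PySem.Set.contains b k0 = typo.contains s := by
        have := hmem 0 (by simp)
        simpa using this
      have hhead : (if PySem.Set.contains b k0 then ['[', '['] ++ [c] ++ [']', ']'] else [c])
          = pvTagA typo text s := by
        simp only [pvTagA, h0]
        exact if_congr (by rw [hm0]) rfl rfl
      rw [hhead]
      congr 1
      have hrest := ih (k0 + 1) (s + 1)
        (by
          intro k hk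
          have := hmem (k + 1) (by simpa using Nat.succ_lt_succ hk)
          push_cast at this ⊢
          rw [show k0 + 1 + (k : Int) = k0 + ((k : Int) + 1) from by ring,
            show s + 1 + (k : Int) = s + ((k : Int) + 1) from by ring]
          exact this)
        (by
          intro k hk
          have := hget (k + 1) (by simpa using Nat.succ_lt_succ hk)
          push_cast at this ⊢
          rw [show s + 1 + (k : Int) = s + ((k : Int) + 1) from by ring]
          simpa using this)
      rw [hrest]
      congr 2
      push_cast [List.length_cons]
      ring

lemma pyGetD_last (l : List Int) (x : Int) :
    PySem.List.pyGetD (l ++ [x]) (-1) 0 = x := by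
  simp [PySem.List.pyGetD, PySem.List.pyGet?, PySem.List.pyIdx?]

lemma O_get (css : List (List Char)) (i : Int) (h0 : 0 ≤ i) (h1 : i ≤ (css.length : Int)) :
    PySem.List.pyGetD ((List.range (css.length + 1)).map (fun k => pvOff css k)) i 0
      = pvOff css i.toNat := by
  rw [show i = ((i.toNat : Nat) : Int) from by omega, PySem.List.pyGetD_natCast]
  rw [List.getD_eq_getElem _ _ (by rw [List.length_map, List.length_range]; omega)]
  rw [List.getElem_map, List.getElem_range, Int.toNat_natCast]

lemma B_closed (segments : List String) (typo : List Int) (mx : Int) :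
    get_segments_to_recorrect_alt segments typo mx
      = pvSpecL typo ((segments.map String.toList).flatten) 0 (segments.map String.toList) := by
  simp only [get_segments_to_recorrect_alt]
  rw [offsets_closed]
  set css := segments.map String.toList with hcss
  have hclen : css.length = segments.length := by rw [hcss, List.length_map]
  rw [← hclen]
  have htot : PySem.List.pyGetD ((List.range (css.length + 1)).map (fun k => pvOff css k)) (-1) 0
      = pvOff css css.length := by
    rw [List.range_succ, List.map_append, List.map_cons, List.map_nil, pyGetD_last]
  rw [htot]
  have hL : ((((List.range (css.length + 1)).map (fun i => pvOff css i)).length : Nat) : Int) - 1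
      = (css.length : Int) := by
    rw [List.length_map, List.length_range]
    push_cast
    ring
  rw [hL]
  have hbody : (fun (bk : List (PySem.Set Int)) (t : Int) =>
      if 0 ≤ t ∧ t < pvOff css css.length then
        bk.modify (gsr_locate ((List.range (css.length + 1)).map (fun i => pvOff css i)) t 0
            (css.length : Int)).toNat
          (fun s => s.add (t - PySem.List.pyGetD ((List.range (css.length + 1)).map (fun i => pvOff css i))
            (gsr_locate ((List.range (css.length + 1)).map (fun i => pvOff css i)) t 0 (css.length : Int)) 0))
      else bk) = pvBucketF css := by
    funext bk t
    unfold pvBucketF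
    by_cases hg : 0 ≤ t ∧ t < pvOff css css.length
    · rw [if_pos hg, if_pos hg]
      have hspec := locate_spec css t 0 (css.length : Int) (le_refl 0) (by omega) (le_refl _)
        (by
          have h0 : pvOff css (0 : Int).toNat = 0 := by simp [pvOff, pvOffN]
          omega)
        (by intro j hj1 hj2; omega)
      dsimp only at hspec
      obtain ⟨hr1, hr2, _, _⟩ := hspec
      rw [O_get css _ hr1 hr2]
    · rw [if_neg hg, if_neg hg]
  rw [hbody]
  apply List.ext_getElem
  · rw [List.length_map, PySem.List.length_enumerate, pvSpecL_length, hclen]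
  · intro i h1 h2
    have hilt : i < css.length := by rw [pvSpecL_length] at h2; exact h2
    rw [List.getElem_map, PySem.List.getElem_enumerate, pvSpecL_get typo css.flatten css 0 i hilt]
    dsimp only
    simp only [pvOut, zero_add]
    have hbuck0len : (segments.map (fun _ => (PySem.Set.empty : PySem.Set Int))).length
        = css.length := by
      rw [List.length_map, hclen]
    have hbuck0 : (segments.map (fun _ => (PySem.Set.empty : PySem.Set Int))).getD i [] = [] := by
      rw [List.getD_eq_getElem _ _ (by rw [hbuck0len]; exact hilt), List.getElem_map]
      rfl
    have hbm := buckets_mem css typo (segments.map (fun _ => PySem.Set.empty)) hbuck0len i hilt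
    rw [PySem.List.pyGetD_natCast]
    have hdef : ∀ (l : List (PySem.Set Int)), l.getD i PySem.Set.empty = l.getD i [] :=
      fun l => rfl
    rw [hdef]
    set b := (List.foldl (pvBucketF css) (segments.map fun _ => PySem.Set.empty) typo).getD i []
      with hb
    have hmemb : ∀ m : Int, m ∈ b ↔
        (0 ≤ m ∧ m < ((css[i]'hilt).length : Int) ∧ (pvOff css i + m) ∈ typo) := by
      intro m
      rw [hbm m, hbuck0]
      simp
    have hcs : segments[i].toList = css[i]'hilt := by simp [hcss]
    have hcond : (b ≠ []) ↔
        ((PySem.List.pyRange (pvOff css i) (pvOff css i + ((css[i]'hilt).length : Int)) 1).any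
          (fun j => typo.contains j) = true) := by
      constructor
      · intro hbne
        obtain ⟨m, hm⟩ := List.exists_mem_of_ne_nil _ hbne
        rw [hmemb] at hm
        obtain ⟨hm1, hm2, hm3⟩ := hm
        rw [List.any_eq_true]
        refine ⟨pvOff css i + m, ?_, by simpa using hm3⟩
        rw [PySem.List.mem_pyRange_one]
        omega
      · intro ha
        rw [List.any_eq_true] at ha
        obtain ⟨j, hj1, hj2⟩ := ha
        rw [PySem.List.mem_pyRange_one] at hj1
        have hm : (j - pvOff css i) ∈ b := by
          rw [hmemb]
          refine ⟨by omega, by omega, ?_⟩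
          rw [show pvOff css i + (j - pvOff css i) = j from by ring]
          simpa using hj2
        intro hbnil
        rw [hbnil] at hm
        simp at hm
    have hcontent := contentC typo css.flatten b (css[i]'hilt) 0 (pvOff css i)
      (by
        intro k hk
        have hiff : ((0 : Int) + (k : Int) ∈ b) ↔ ((pvOff css i + (k : Int)) ∈ typo) := by
          rw [zero_add, hmemb]
          constructor
          · rintro ⟨_, _, h⟩
            exact h
          · intro h
            exact ⟨by omega, by exact_mod_cast hk, h⟩
        rw [Bool.eq_iff_iff, PySem.Set.contains_iff]
        constructor
        · intro h
          have := hiff.mp h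
          simpa using this
        · intro h
          apply hiff.mpr
          simpa using h)
      (fun k hk => text_get css i hilt k hk)
    rw [hcs]
    exact if_congr hcond (congrArg String.ofList hcontent) rfl

-- ===== VERDICT (by name: the statement is the Claim_ definition above) =====
theorem get_segments_to_recorrect_spec : Claim_equal_get_segments_to_recorrect := by
  intro segments typo_indices max_length _
  unfold Spec_get_segments_to_recorrect
  rw [portA_unfold, A_closed typo_indices ((segments.map String.toList).flatten) segments 0 [],
    List.nil_append, B_closed]
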